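-- pv_equiv track=rewrite | github.com/danieleschmidt/vid-diffusion-benchmark-suite | src/vid_diffusion_bench/global_compliance_framework.py | _generate_gdpr_recommendations
-- ===== SOURCE A (Python) =====
-- from typing import Dict, List, Any, Optional, Tuple, Union, Set
--
-- def _generate_gdpr_recommendations(findings: List[Dict[str, Any]]) -> List[str]:
--     """Generate GDPR compliance recommendations."""
--
--     recommendations = []
--
--     if not findings:
--         recommendations.append("GDPR compliance is satisfactory")
--         return recommendations
--
--     # Analyze common issues
--     all_issues = []
--     for finding in findings:
--         all_issues.extend(finding["issues"])
--
--     if any("legal basis" in issue for issue in all_issues):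
--         recommendations.append("Review and document legal basis for all processing activities")
--
--     if any("security" in issue for issue in all_issues):
--         recommendations.append("Implement comprehensive technical and organizational measures")
--
--     if any("retention" in issue for issue in all_issues):
--         recommendations.append("Establish clear data retention policies and automated deletion")
--
--     if any("transfer" in issue for issue in all_issues):
--         recommendations.append("Implement appropriate safeguards for international transfers")
--
--     recommendations.append("Conduct regular GDPR compliance assessments")
--     recommendations.append("Provide GDPR training for all personnel handling personal data")
--
--     return recommendations
-- ===== SOURCE B (Python) =====
-- def _generate_gdpr_recommendations(findings):
--     """Generate GDPR compliance recommendations (single-pass flag version)."""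
--     if not findings:
--         return ["GDPR compliance is satisfactory"]
--
--     legal = security = retention = transfer = False
--     for finding in findings:
--         for issue in finding["issues"]:
--             legal = legal or "legal basis" in issue
--             security = security or "security" in issue
--             retention = retention or "retention" in issue
--             transfer = transfer or "transfer" in issue
--
--     recommendations = []
--     if legal:
--         recommendations.append("Review and document legal basis for all processing activities")
--     if security:
--         recommendations.append("Implement comprehensive technical and organizational measures")
--     if retention:
--         recommendations.append("Establish clear data retention policies and automated deletion")
--     if transfer:
--         recommendations.append("Implement appropriate safeguards for international transfers")
--     recommendations.append("Conduct regular GDPR compliance assessments")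
--     recommendations.append("Provide GDPR training for all personnel handling personal data")
--     return recommendations
-- ===== Notes on version B (the rewrite author's own statement) =====
-- stated objective: alternative
-- what changed: B makes one pass over findings' issues maintaining four boolean flags instead of materialising an all_issues list and running four separate any() scans over it.
import Mathlib
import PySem

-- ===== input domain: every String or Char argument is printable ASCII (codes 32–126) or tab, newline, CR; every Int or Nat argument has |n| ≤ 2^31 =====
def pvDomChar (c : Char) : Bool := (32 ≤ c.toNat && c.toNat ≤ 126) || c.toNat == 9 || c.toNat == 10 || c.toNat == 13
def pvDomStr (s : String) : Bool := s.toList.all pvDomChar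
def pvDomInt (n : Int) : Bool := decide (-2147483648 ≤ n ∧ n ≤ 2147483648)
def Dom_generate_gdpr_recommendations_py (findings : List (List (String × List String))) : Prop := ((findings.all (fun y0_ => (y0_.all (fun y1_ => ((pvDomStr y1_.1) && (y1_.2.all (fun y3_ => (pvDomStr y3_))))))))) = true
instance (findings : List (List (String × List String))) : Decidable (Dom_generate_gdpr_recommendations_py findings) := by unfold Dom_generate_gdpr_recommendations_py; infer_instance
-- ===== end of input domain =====

-- B replaces A's all_issues list plus four separate any() scans by one pass over the
-- findings maintaining four boolean flags; same return value, alternative decomposition.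

-- ===== PORT A =====
-- finding["issues"]: first-match dict lookup; Pre_ guarantees the key is present, so getD [] is exact.
def generate_gdpr_recommendations_py (findings : List (List (String × List String))) : List String :=
  if findings.isEmpty then ["GDPR compliance is satisfactory"]
  else
    let all_issues : List String :=
      findings.foldl (fun acc f => acc ++ (((PySem.Dict.ofList f).get? "issues").getD [])) []
    let recs : List String := []
    let recs := if all_issues.any (fun i => PySem.Str.isIn "legal basis" i) then
      recs ++ ["Review and document legal basis for all processing activities"] else recs
    let recs := if all_issues.any (fun i => PySem.Str.isIn "security" i) then
      recs ++ ["Implement comprehensive technical and organizational measures"] else recs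
    let recs := if all_issues.any (fun i => PySem.Str.isIn "retention" i) then
      recs ++ ["Establish clear data retention policies and automated deletion"] else recs
    let recs := if all_issues.any (fun i => PySem.Str.isIn "transfer" i) then
      recs ++ ["Implement appropriate safeguards for international transfers"] else recs
    recs ++ ["Conduct regular GDPR compliance assessments",
             "Provide GDPR training for all personnel handling personal data"]

-- ===== PORT B =====
-- one pass: fold the four flags over each finding's issues
def pvScanIssues (fl : Bool × Bool × Bool × Bool) (issues : List String) : Bool × Bool × Bool × Bool :=
  issues.foldl (fun fl i =>
    (fl.1 || PySem.Str.isIn "legal basis" i,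
     fl.2.1 || PySem.Str.isIn "security" i,
     fl.2.2.1 || PySem.Str.isIn "retention" i,
     fl.2.2.2 || PySem.Str.isIn "transfer" i)) fl

def generate_gdpr_recommendations_py_alt (findings : List (List (String × List String))) : List String :=
  if findings.isEmpty then ["GDPR compliance is satisfactory"]
  else
    let fl := findings.foldl
      (fun fl f => pvScanIssues fl (((PySem.Dict.ofList f).get? "issues").getD []))
      (false, false, false, false)
    (if fl.1 then ["Review and document legal basis for all processing activities"] else []) ++
    (if fl.2.1 then ["Implement comprehensive technical and organizational measures"] else []) ++
    (if fl.2.2.1 then ["Establish clear data retention policies and automated deletion"] else []) ++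
    (if fl.2.2.2 then ["Implement appropriate safeguards for international transfers"] else []) ++
    ["Conduct regular GDPR compliance assessments",
     "Provide GDPR training for all personnel handling personal data"]

-- ===== PRECONDITION & SPEC =====
-- Pre_ excludes exactly the findings lacking an "issues" key, on which the Python A raises KeyError.
def Pre_generate_gdpr_recommendations_py (findings : List (List (String × List String))) : Prop :=
  (findings.all (fun f => ((PySem.Dict.ofList f).get? "issues").isSome)) = true
instance (findings : List (List (String × List String))) : Decidable (Pre_generate_gdpr_recommendations_py findings) := by unfold Pre_generate_gdpr_recommendations_py; infer_instance
def pvWitness_generate_gdpr_recommendations_py : (List (List (String × List String))) :=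
  [[("issues", ["no legal basis documented"])]]
def Spec_generate_gdpr_recommendations_py (findings : List (List (String × List String))) (out : List String) : Prop := out = generate_gdpr_recommendations_py_alt findings
instance (findings : List (List (String × List String))) (out : List String) : Decidable (Spec_generate_gdpr_recommendations_py findings out) := by unfold Spec_generate_gdpr_recommendations_py; infer_instance

-- ===== CLAIM (what is proved, stated in full; the proofs are below) =====
def Claim_equal_generate_gdpr_recommendations_py : Prop := ∀ (findings : List (List (String × List String))), Dom_generate_gdpr_recommendations_py findings → Pre_generate_gdpr_recommendations_py findings → Spec_generate_gdpr_recommendations_py findings (generate_gdpr_recommendations_py findings)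

-- ===== LEMMAS AND PROOFS =====

-- the flag fold over one issue list is componentwise "old flag or any issue matches"
theorem pvScanIssues_eq (fl : Bool × Bool × Bool × Bool) (issues : List String) :
    pvScanIssues fl issues =
      (fl.1 || issues.any (fun i => PySem.Str.isIn "legal basis" i),
       fl.2.1 || issues.any (fun i => PySem.Str.isIn "security" i),
       fl.2.2.1 || issues.any (fun i => PySem.Str.isIn "retention" i),
       fl.2.2.2 || issues.any (fun i => PySem.Str.isIn "transfer" i)) := by
  induction issues generalizing fl with
  | nil => simp [pvScanIssues]
  | cons i rest ih =>
      have hstep : pvScanIssues fl (i :: rest) =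
          pvScanIssues (fl.1 || PySem.Str.isIn "legal basis" i,
                        fl.2.1 || PySem.Str.isIn "security" i,
                        fl.2.2.1 || PySem.Str.isIn "retention" i,
                        fl.2.2.2 || PySem.Str.isIn "transfer" i) rest := rfl
      rw [hstep, ih]
      simp [List.any_cons, Bool.or_assoc]

-- the outer fold computes the four any-scans over the concatenation of all issue lists
theorem pvScanFold_eq (g : List (String × List String) → List String)
    (findings : List (List (String × List String))) (fl : Bool × Bool × Bool × Bool) :
    findings.foldl (fun fl f => pvScanIssues fl (g f)) fl =
      (fl.1 || (findings.flatMap g).any (fun i => PySem.Str.isIn "legal basis" i),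
       fl.2.1 || (findings.flatMap g).any (fun i => PySem.Str.isIn "security" i),
       fl.2.2.1 || (findings.flatMap g).any (fun i => PySem.Str.isIn "retention" i),
       fl.2.2.2 || (findings.flatMap g).any (fun i => PySem.Str.isIn "transfer" i)) := by
  induction findings generalizing fl with
  | nil => simp
  | cons f rest ih =>
      rw [List.foldl_cons, pvScanIssues_eq, ih]
      simp [List.flatMap_cons, List.any_append, Bool.or_assoc]

-- ===== VERDICT (by name: the statement is the Claim_ definition above) =====
theorem generate_gdpr_recommendations_py_spec : Claim_equal_generate_gdpr_recommendations_py := by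
  intro findings _ _
  unfold Spec_generate_gdpr_recommendations_py
  unfold generate_gdpr_recommendations_py generate_gdpr_recommendations_py_alt
  by_cases h : findings.isEmpty
  · simp [h]
  · rw [if_neg h, if_neg h]
    rw [pvScanFold_eq (fun f => ((PySem.Dict.ofList f).get? "issues").getD []) findings
        (false, false, false, false),
        PySem.List.foldl_append_eq_flatMap]
    simp only [Bool.false_or, List.nil_append]
    split_ifs <;> simp_all
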